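-- pv_equiv track=rewrite | github.com/juyeonjeung-gif/ai-service | .github/scripts/sync_to_notion.py | get_section_content_ids
-- ===== SOURCE A (Python) =====
-- def get_section_content_ids(blocks: list, heading_id: str) -> list[str]:
--     """heading 블록 다음부터 다음 같은 레벨 heading 전까지의 블록 ID 목록을 반환한다."""
--     heading_level = None
--     in_section = False
--     ids = []
--
--     for block in blocks:
--         if block["id"] == heading_id:
--             heading_level = block.get("type")
--             in_section = True
--             continue
--
--         if in_section:
--             btype = block.get("type", "")
--             if btype in ("heading_2", "heading_3"):
--                 if heading_level == "heading_2":
--                     break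
--                 if heading_level == "heading_3" and btype in ("heading_2", "heading_3"):
--                     break
--             ids.append(block["id"])
--
--     return ids
-- ===== SOURCE B (Python) =====
-- def get_section_content_ids(blocks: list, heading_id: str) -> list[str]:
--     """Index arithmetic: compute the section's start and stop indices, then
--     return the ids of the slice between them via a comprehension."""
--     start = next((i for i, b in enumerate(blocks) if b["id"] == heading_id), None)
--     if start is None:
--         return []
--     level = blocks[start].get("type")
--     tail = blocks[start + 1:]
--     if level in ("heading_2", "heading_3"):
--         stop = next((j for j, b in enumerate(tail)
--                      if b.get("type", "") in ("heading_2", "heading_3")), len(tail))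
--     else:
--         stop = len(tail)
--     return [b["id"] for b in tail[:stop]]
-- ===== Notes on version B (the rewrite author's own statement) =====
-- stated objective: alternative
-- what changed: Replaces A's stateful flag-machine scan (in_section/heading_level with break/append) by index arithmetic: compute the start index of the heading and the stop index of the next heading, then return the ids of the slice between them via a comprehension.
-- outside the precondition, e.g. on get_section_content_ids([{'id': 'h'}, {'id': 'h'}, {'id': 'y'}], 'h'): A returns ['y'], B returns ['h', 'y']; on get_section_content_ids([{'type': 'p'}], 'h'): A raises KeyError, B raises KeyError
import Mathlib
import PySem

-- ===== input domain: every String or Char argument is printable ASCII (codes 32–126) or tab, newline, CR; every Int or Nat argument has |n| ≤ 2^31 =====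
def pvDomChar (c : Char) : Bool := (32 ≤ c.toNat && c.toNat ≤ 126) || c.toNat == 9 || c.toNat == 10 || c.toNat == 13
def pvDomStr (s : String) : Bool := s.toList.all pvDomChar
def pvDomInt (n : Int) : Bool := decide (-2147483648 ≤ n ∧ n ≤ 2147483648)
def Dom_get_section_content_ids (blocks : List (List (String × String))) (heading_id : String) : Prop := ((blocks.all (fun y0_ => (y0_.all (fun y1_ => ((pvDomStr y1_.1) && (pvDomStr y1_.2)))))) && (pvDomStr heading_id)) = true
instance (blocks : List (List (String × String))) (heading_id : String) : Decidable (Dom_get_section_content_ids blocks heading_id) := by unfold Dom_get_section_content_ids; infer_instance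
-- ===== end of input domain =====

-- B replaces A's stateful flag-machine scan by index arithmetic: start index of the
-- heading, stop index of the next heading, then ids of the slice between them;
-- objective: alternative.

-- ===== PORT A =====
-- block["id"] is ported as getD "" ; exact under Pre_ (every block carries an "id" key).
def aLoop (heading_id : String) (hl : Option String) (ins : Bool) (ids : List String) :
    List (List (String × String)) → List String
  | [] => ids
  | b :: rest =>
    if (PySem.Dict.mk b).getD "id" "" = heading_id then
      aLoop heading_id ((PySem.Dict.mk b).get? "type") true ids rest
    else if ins then
      let btype := (PySem.Dict.mk b).getD "type" ""
      if (btype = "heading_2" ∨ btype = "heading_3") ∧ hl = some "heading_2" then ids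
      else if (btype = "heading_2" ∨ btype = "heading_3") ∧ hl = some "heading_3" ∧
              (btype = "heading_2" ∨ btype = "heading_3") then ids
      else aLoop heading_id hl ins (ids ++ [(PySem.Dict.mk b).getD "id" ""]) rest
    else aLoop heading_id hl ins ids rest

def get_section_content_ids (blocks : List (List (String × String))) (heading_id : String) : List String :=
  aLoop heading_id none false [] blocks

-- ===== PORT B =====
def blkId (b : List (String × String)) : String := (PySem.Dict.mk b).getD "id" ""
def blkType (b : List (String × String)) : String := (PySem.Dict.mk b).getD "type" ""
def isHeadingB (b : List (String × String)) : Bool :=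
  blkType b == "heading_2" || blkType b == "heading_3"

def get_section_content_ids_alt (blocks : List (List (String × String))) (heading_id : String) : List String :=
  match blocks.findIdx? (fun b => blkId b == heading_id) with
  | none => []
  | some i =>
    let lvl := (PySem.Dict.mk (blocks.getD i [])).get? "type"
    let tail := blocks.drop (i + 1)
    let stop := if lvl = some "heading_2" ∨ lvl = some "heading_3"
                then (tail.findIdx? isHeadingB).getD tail.length
                else tail.length
    (tail.take stop).map blkId

-- ===== PRECONDITION & SPEC =====
-- Pre_ excludes (a) blocks missing the "id" key, on which A raises KeyError (slightly
-- narrowed: A would not evaluate blocks after its break point), and (b) blocks in which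
-- heading_id occurs more than once, on which A's reset-and-skip of the later occurrence
-- is an accident of its flag state (both behaviours defensible on duplicate ids).
def Pre_get_section_content_ids (blocks : List (List (String × String))) (heading_id : String) : Prop :=
  (∀ b ∈ blocks, ((PySem.Dict.mk b).get? "id").isSome) ∧
  blocks.countP (fun b => (PySem.Dict.mk b).getD "id" "" = heading_id) ≤ 1
instance (blocks : List (List (String × String))) (heading_id : String) : Decidable (Pre_get_section_content_ids blocks heading_id) := by unfold Pre_get_section_content_ids; infer_instance

def pvWitness_get_section_content_ids : (List (List (String × String))) × String :=
  ([[("id", "h1"), ("type", "heading_2")], [("id", "p1"), ("type", "paragraph")],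
    [("id", "p2"), ("type", "heading_1")], [("id", "h2"), ("type", "heading_2")]], "h1")

def Spec_get_section_content_ids (blocks : List (List (String × String))) (heading_id : String) (out : List String) : Prop := out = get_section_content_ids_alt blocks heading_id
instance (blocks : List (List (String × String))) (heading_id : String) (out : List String) : Decidable (Spec_get_section_content_ids blocks heading_id out) := by unfold Spec_get_section_content_ids; infer_instance

-- ===== CLAIM (what is proved, stated in full; the proofs are below) =====
def Claim_equal_get_section_content_ids : Prop := ∀ (blocks : List (List (String × String))) (heading_id : String), Dom_get_section_content_ids blocks heading_id → Pre_get_section_content_ids blocks heading_id → Spec_get_section_content_ids blocks heading_id (get_section_content_ids blocks heading_id)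

-- ===== LEMMAS AND PROOFS =====

-- B's stop index, abstracted over the level (proof helper)
def stopN (lvl : Option String) (tail : List (List (String × String))) : Nat :=
  if lvl = some "heading_2" ∨ lvl = some "heading_3"
  then (tail.findIdx? isHeadingB).getD tail.length
  else tail.length

theorem getD_map_succ (o : Option Nat) (n : Nat) :
    (o.map (· + 1)).getD (n + 1) = (o.getD n) + 1 := by cases o <;> rfl

theorem stopN_cons_skip (lvl : Option String) (b : List (String × String))
    (rest : List (List (String × String)))
    (h : isHeadingB b = false ∨ ¬ (lvl = some "heading_2" ∨ lvl = some "heading_3")) :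
    stopN lvl (b :: rest) = stopN lvl rest + 1 := by
  unfold stopN
  by_cases hlv : lvl = some "heading_2" ∨ lvl = some "heading_3"
  · have hb : isHeadingB b = false := h.resolve_right (not_not_intro hlv)
    simp only [if_pos hlv, List.findIdx?_cons, hb, Bool.false_eq_true, if_false,
      List.length_cons]
    exact getD_map_succ _ _
  · simp [hlv]

theorem stopN_cons_stop (lvl : Option String) (b : List (String × String))
    (rest : List (List (String × String)))
    (hb : isHeadingB b = true) (hlv : lvl = some "heading_2" ∨ lvl = some "heading_3") :
    stopN lvl (b :: rest) = 0 := by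
  unfold stopN
  simp [List.findIdx?_cons, hb, hlv]

-- after the heading was found: A's in-section loop yields the ids of B's slice
theorem aLoop_in_section (heading_id : String) (lvl : Option String) :
    ∀ (tail : List (List (String × String))) (ids : List String),
      (∀ b ∈ tail, blkId b ≠ heading_id) →
      aLoop heading_id lvl true ids tail = ids ++ (tail.take (stopN lvl tail)).map blkId := by
  intro tail
  induction tail with
  | nil => intro ids _; simp [aLoop]
  | cons b rest ih =>
    intro ids h
    have hb : blkId b ≠ heading_id := h b (by simp)
    have hrest : ∀ b' ∈ rest, blkId b' ≠ heading_id := fun b' hb' => h b' (by simp [hb'])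
    simp only [aLoop, blkId] at hb ⊢
    rw [if_neg hb]
    simp only [if_true]
    by_cases hbt : (PySem.Dict.mk b).getD "type" "" = "heading_2" ∨
                   (PySem.Dict.mk b).getD "type" "" = "heading_3"
    · have hhead : isHeadingB b = true := by
        simp only [isHeadingB, blkType]
        cases hbt with
        | inl h2 => simp [h2]
        | inr h3 => simp [h3]
      by_cases hlv : lvl = some "heading_2" ∨ lvl = some "heading_3"
      · rw [stopN_cons_stop lvl b rest hhead hlv]
        rcases hlv with h2 | h3
        · simp [hbt, h2]
        · by_cases h2' : lvl = some "heading_2"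
          · simp [hbt, h2']
          · simp [hbt, h3]
      · have h2 : lvl ≠ some "heading_2" := fun h => hlv (Or.inl h)
        have h3 : lvl ≠ some "heading_3" := fun h => hlv (Or.inr h)
        rw [stopN_cons_skip lvl b rest (Or.inr hlv)]
        rw [ih _ hrest]
        simp [h2, h3, blkId, List.append_assoc]
    · have hhead : isHeadingB b = false := by
        simp only [isHeadingB, blkType]
        have h2 : (PySem.Dict.mk b).getD "type" "" ≠ "heading_2" := fun h => hbt (Or.inl h)
        have h3 : (PySem.Dict.mk b).getD "type" "" ≠ "heading_3" := fun h => hbt (Or.inr h)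
        simp [h2, h3]
      rw [stopN_cons_skip lvl b rest (Or.inl hhead)]
      rw [ih _ hrest]
      simp [hbt, blkId, List.append_assoc]

-- B skips a non-matching head block
theorem alt_cons_skip (heading_id : String) (b : List (String × String))
    (rest : List (List (String × String))) (hb : blkId b ≠ heading_id) :
    get_section_content_ids_alt (b :: rest) heading_id =
      get_section_content_ids_alt rest heading_id := by
  unfold get_section_content_ids_alt
  have hpb : (blkId b == heading_id) = false := by simp [hb]
  rw [List.findIdx?_cons, hpb]
  cases hfi : rest.findIdx? (fun b' => blkId b' == heading_id) with
  | none => simp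
  | some i => simp

-- the search phase: A's whole loop against B's index computation
theorem aLoop_search (heading_id : String) (hl : Option String) :
    ∀ (blocks : List (List (String × String))),
      blocks.countP (fun b => (PySem.Dict.mk b).getD "id" "" = heading_id) ≤ 1 →
      aLoop heading_id hl false [] blocks = get_section_content_ids_alt blocks heading_id := by
  intro blocks
  induction blocks with
  | nil => intro _; simp [aLoop, get_section_content_ids_alt]
  | cons b rest ih =>
    intro hcnt
    by_cases hb : (PySem.Dict.mk b).getD "id" "" = heading_id
    · have hrest0 : rest.countP (fun b => (PySem.Dict.mk b).getD "id" "" = heading_id) = 0 := by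
        rw [List.countP_cons] at hcnt
        have hpb : decide ((PySem.Dict.mk b).getD "id" "" = heading_id) = true := by simp [hb]
        rw [hpb, if_pos rfl] at hcnt
        omega
      have hno : ∀ b' ∈ rest, blkId b' ≠ heading_id := by
        have := List.countP_eq_zero.mp hrest0
        intro b' hb' heq
        exact absurd (by simpa [blkId] using heq) (by simpa using this b' hb')
      have hpb : (blkId b == heading_id) = true := by simp [blkId, hb]
      simp only [aLoop, if_pos hb]
      rw [aLoop_in_section heading_id _ rest [] hno]
      unfold get_section_content_ids_alt
      rw [List.findIdx?_cons, hpb]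
      simp [stopN]
    · have hrest : rest.countP (fun b => (PySem.Dict.mk b).getD "id" "" = heading_id) ≤ 1 := by
        rw [List.countP_cons] at hcnt; omega
      rw [alt_cons_skip heading_id b rest (by simpa [blkId] using hb)] at *
      simp only [aLoop, if_neg hb, Bool.false_eq_true, if_false]
      exact ih hrest

-- ===== VERDICT (by name: the statement is the Claim_ definition above) =====
theorem get_section_content_ids_spec : Claim_equal_get_section_content_ids := by
  intro blocks heading_id _ hpre
  exact aLoop_search heading_id none blocks hpre.2
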